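-- pv_equiv track=rewrite | github.com/dawnandrew100/Advent_of_Code | 2015/Day 03/Python/main.py | solo_santa
-- ===== SOURCE A (Python) =====
-- from collections import defaultdict
--
-- def solo_santa(directions: str) -> int:
--   presents_delivered = defaultdict(int)
--   x, y = 0, 0
--   presents_delivered["0, 0"] += 1
--
--   for direction in directions:
--     match direction:
--       case "^":
--         y += 1
--         coord = f"{x}, {y}"
--         presents_delivered[coord] += 1
--       case "v":
--         y -= 1
--         coord = f"{x}, {y}"
--         presents_delivered[coord] += 1
--       case ">":
--         x += 1
--         coord = f"{x}, {y}"
--         presents_delivered[coord] += 1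
--       case "<":
--         x -= 1
--         coord = f"{x}, {y}"
--         presents_delivered[coord] += 1
--   return len(presents_delivered)
-- ===== SOURCE B (Python) =====
-- def solo_santa(directions: str) -> int:
--     deltas = {"^": (0, 1), "v": (0, -1), ">": (1, 0), "<": (-1, 0)}
--     x, y = 0, 0
--     positions = [(0, 0)]
--     for c in directions:
--         dx, dy = deltas.get(c, (0, 0))
--         x, y = x + dx, y + dy
--         positions.append((x, y))
--     positions.sort()
--     return 1 + sum(1 for a, b in zip(positions, positions[1:]) if a != b)
-- ===== Notes on version B (the rewrite author's own statement) =====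
-- stated objective: alternative
-- what changed: A counts distinct houses with a hash map keyed by formatted coordinate strings updated inside a match statement; B records the visited positions as tuples, sorts them lexicographically, and counts runs by counting adjacent unequal neighbours (sort-then-scan deduplication instead of hash-based counting).
import Mathlib
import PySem

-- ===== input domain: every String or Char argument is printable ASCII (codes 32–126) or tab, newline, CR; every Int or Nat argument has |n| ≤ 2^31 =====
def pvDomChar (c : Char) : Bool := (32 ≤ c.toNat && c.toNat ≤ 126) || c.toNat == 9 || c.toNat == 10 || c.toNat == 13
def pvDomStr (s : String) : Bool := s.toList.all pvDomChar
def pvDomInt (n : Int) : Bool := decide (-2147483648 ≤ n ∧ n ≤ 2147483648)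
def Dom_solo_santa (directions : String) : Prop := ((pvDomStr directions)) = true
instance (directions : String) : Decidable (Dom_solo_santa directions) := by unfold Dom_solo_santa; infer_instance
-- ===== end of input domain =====

-- B replaces A's hash-map count of string-keyed coordinates by sort-then-scan
-- deduplication: record the visited positions, sort them, count adjacent changes
-- (objective: alternative).

-- ===== PORT A =====
-- f"{x}, {y}"
def pvCoord (x y : Int) : String :=
  String.ofList (PySem.Int.toChars x ++ ',' :: ' ' :: PySem.Int.toChars y)

def pvStepA (s : PySem.Dict String Int × Int × Int) (c : Char) :
    PySem.Dict String Int × Int × Int :=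
  let (d, x, y) := s
  if c = '^' then
    let y := y + 1
    let coord := pvCoord x y
    (d.insert coord (d.getD coord 0 + 1), x, y)
  else if c = 'v' then
    let y := y - 1
    let coord := pvCoord x y
    (d.insert coord (d.getD coord 0 + 1), x, y)
  else if c = '>' then
    let x := x + 1
    let coord := pvCoord x y
    (d.insert coord (d.getD coord 0 + 1), x, y)
  else if c = '<' then
    let x := x - 1
    let coord := pvCoord x y
    (d.insert coord (d.getD coord 0 + 1), x, y)
  else (d, x, y)

def solo_santa (directions : String) : Int :=
  let d0 : PySem.Dict String Int := PySem.Dict.empty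
  let d0 := d0.insert "0, 0" (d0.getD "0, 0" 0 + 1)
  let res := directions.toList.foldl pvStepA (d0, 0, 0)
  (res.1.items.length : Int)

-- ===== PORT B =====
-- deltas.get(c, (0, 0))
def pvDelta (c : Char) : Int × Int :=
  if c = '^' then (0, 1)
  else if c = 'v' then (0, -1)
  else if c = '>' then (1, 0)
  else if c = '<' then (-1, 0)
  else (0, 0)

-- the loop body: move and append the new position
def pvStepB (s : Int × Int × List (Int × Int)) (c : Char) :
    Int × Int × List (Int × Int) :=
  let (x, y, ps) := s
  let d := pvDelta c
  (x + d.1, y + d.2, ps ++ [(x + d.1, y + d.2)])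

def solo_santa_alt (directions : String) : Int :=
  let st := directions.toList.foldl pvStepB (0, 0, [((0 : Int), (0 : Int))])
  -- positions.sort(): Python's lexicographic tuple sort
  let s := PySem.List.sorted2 st.2.2 Prod.fst Prod.snd
  -- 1 + sum(1 for a, b in zip(positions, positions[1:]) if a != b)
  1 + (((s.zip s.tail).countP (fun p => decide (p.1 ≠ p.2)) : Int))

-- ===== PRECONDITION & SPEC =====
def Spec_solo_santa (directions : String) (out : Int) : Prop := out = solo_santa_alt directions
instance (directions : String) (out : Int) : Decidable (Spec_solo_santa directions out) := by unfold Spec_solo_santa; infer_instance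

-- ===== CLAIM (what is proved, stated in full; the proofs are below) =====
def Claim_equal_solo_santa : Prop := ∀ (directions : String), Dom_solo_santa directions → Spec_solo_santa directions (solo_santa directions)

-- ===== LEMMAS AND PROOFS =====

theorem pv_digitChar_isDigit (m : Nat) (h : m < 10) : (Nat.digitChar m).isDigit := by
  interval_cases m <;> decide

theorem pv_digitChar_toNat (m : Nat) (h : m < 10) : (Nat.digitChar m).toNat - 48 = m := by
  interval_cases m <;> decide

-- `Nat.toDigits 10` produces digit characters (on top of the accumulator).
theorem pv_mem_toDigitsCore (fuel n : Nat) (ds : List Char) (c : Char)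
    (h : c ∈ Nat.toDigitsCore 10 fuel n ds) : c ∈ ds ∨ c.isDigit := by
  induction fuel generalizing n ds with
  | zero => exact Or.inl h
  | succ fuel ih =>
    have hd : (Nat.digitChar (n % 10)).isDigit :=
      pv_digitChar_isDigit _ (Nat.mod_lt _ (by norm_num))
    simp only [Nat.toDigitsCore] at h
    by_cases hz : n / 10 = 0
    · rw [if_pos hz] at h
      rcases List.mem_cons.mp h with h | h
      · exact Or.inr (h ▸ hd)
      · exact Or.inl h
    · rw [if_neg hz] at h
      rcases ih _ _ h with h | h
      · rcases List.mem_cons.mp h with h | h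
        · exact Or.inr (h ▸ hd)
        · exact Or.inl h
      · exact Or.inr h

theorem pv_mem_toDigits (n : Nat) (c : Char) (h : c ∈ Nat.toDigits 10 n) : c.isDigit := by
  rcases pv_mem_toDigitsCore _ _ _ _ h with h | h
  · simp at h
  · exact h

-- folding the digit values back recovers the number
theorem pv_foldl_toDigitsCore (fuel : Nat) :
    ∀ n ds, n < 10 ^ fuel →
      (Nat.toDigitsCore 10 fuel n ds).foldl (fun a c => a * 10 + (c.toNat - 48)) 0
        = ds.foldl (fun a c => a * 10 + (c.toNat - 48)) n := by
  induction fuel with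
  | zero => intro n ds h; interval_cases n; rfl
  | succ fuel ih =>
    intro n ds h
    have hchar := pv_digitChar_toNat (n % 10) (Nat.mod_lt _ (by norm_num))
    simp only [Nat.toDigitsCore]
    split
    · next hz =>
      have hn : n % 10 = n := Nat.mod_eq_of_lt (by omega)
      simp only [List.foldl_cons, hchar]
      rw [hn, Nat.zero_mul, Nat.zero_add]
    · next hz =>
      have hlt : n / 10 < 10 ^ fuel := by
        have := Nat.pow_succ 10 fuel
        omega
      rw [ih _ _ hlt]
      simp only [List.foldl_cons, hchar]
      have hnm : n / 10 * 10 + n % 10 = n := by omega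
      rw [hnm]

theorem pv_toDigits_inj {a b : Nat} (h : Nat.toDigits 10 a = Nat.toDigits 10 b) : a = b := by
  have ha : a < 10 ^ (a + 1) :=
    calc a < 10 ^ a := Nat.lt_pow_self (by norm_num)
    _ ≤ 10 ^ (a + 1) := Nat.pow_le_pow_right (by norm_num) (Nat.le_succ a)
  have hb : b < 10 ^ (b + 1) :=
    calc b < 10 ^ b := Nat.lt_pow_self (by norm_num)
    _ ≤ 10 ^ (b + 1) := Nat.pow_le_pow_right (by norm_num) (Nat.le_succ b)
  have h1 := pv_foldl_toDigitsCore (a + 1) a [] ha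
  have h2 := pv_foldl_toDigitsCore (b + 1) b [] hb
  unfold Nat.toDigits at h
  rw [h] at h1
  rw [h1] at h2
  simpa using h2

theorem pv_dash_not_mem (n : Nat) : '-' ∉ Nat.toDigits 10 n := fun h =>
  absurd (pv_mem_toDigits _ _ h) (by decide)

theorem pv_toChars_inj {a b : Int} (h : PySem.Int.toChars a = PySem.Int.toChars b) : a = b := by
  unfold PySem.Int.toChars at h
  split at h <;> split at h
  · next ha hb =>
    simp only [List.cons.injEq, true_and] at h
    have := pv_toDigits_inj h
    omega
  · next ha hb =>
    exact absurd (h ▸ List.mem_cons_self) (pv_dash_not_mem _)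
  · next ha hb =>
    exact absurd (h.symm ▸ List.mem_cons_self) (pv_dash_not_mem _)
  · next ha hb =>
    have := pv_toDigits_inj h
    omega

theorem pv_no_comma (n : Int) : ',' ∉ PySem.Int.toChars n := by
  unfold PySem.Int.toChars
  split <;> intro h
  · rcases List.mem_cons.mp h with h | h
    · exact absurd h (by decide)
    · exact absurd (pv_mem_toDigits _ _ h) (by decide)
  · exact absurd (pv_mem_toDigits _ _ h) (by decide)

theorem pv_comma_split {a a' r r' : List Char} (ha : ',' ∉ a) (ha' : ',' ∉ a')
    (h : a ++ ',' :: r = a' ++ ',' :: r') : a = a' ∧ r = r' := by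
  induction a generalizing a' with
  | nil =>
    cases a' with
    | nil => simpa using h
    | cons x xs =>
      simp at h
      exact absurd (h.1 ▸ List.mem_cons_self) ha'
  | cons x xs ih =>
    cases a' with
    | nil =>
      simp at h
      exact absurd (h.1 ▸ List.mem_cons_self) ha
    | cons y ys =>
      simp at h ha ha'
      obtain ⟨rfl, h2⟩ := h
      obtain ⟨h3, h4⟩ := ih ha.2 ha'.2 h2
      exact ⟨by simp [h3], h4⟩

theorem pvCoord_inj {x y x' y' : Int} (h : pvCoord x y = pvCoord x' y') : x = x' ∧ y = y' := by
  unfold pvCoord at h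
  have h' := congrArg String.toList h
  simp only [String.toList_ofList] at h'
  obtain ⟨h1, h2⟩ := pv_comma_split (pv_no_comma x) (pv_no_comma x') h'
  simp only [List.cons.injEq] at h2
  exact ⟨pv_toChars_inj h1, pv_toChars_inj h2.2⟩

-- positions as pairs, and their string keys
def pvEncode (p : Int × Int) : String := pvCoord p.1 p.2

-- the running position after a move
def pvMove (p d : Int × Int) : Int × Int := (p.1 + d.1, p.2 + d.2)

theorem pvEncode_inj {p q : Int × Int} (h : pvEncode p = pvEncode q) : p = q := by
  obtain ⟨h1, h2⟩ := pvCoord_inj h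
  exact Prod.ext h1 h2

theorem pv_keys_insert (d : PySem.Dict String Int) (k : String) (v : Int) :
    (d.insert k v).keys = PySem.Set.add d.keys k := by
  have hc : d.contains k = PySem.Set.contains d.keys k := by
    unfold PySem.Dict.contains PySem.Set.contains PySem.Dict.keys
    rw [Bool.eq_iff_iff]
    simp only [List.contains_iff_mem, List.any_eq_true, List.mem_map, beq_iff_eq]
  unfold PySem.Dict.insert PySem.Set.add
  rw [hc]
  split
  · unfold PySem.Dict.keys
    simp only [List.map_map]
    apply List.map_congr_left
    intro p _
    simp only [Function.comp_apply]
    split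
    · next hpk => exact (eq_of_beq hpk).symm
    · rfl
  · unfold PySem.Dict.keys
    simp

theorem pv_map_add (S : PySem.Set (Int × Int)) (q : Int × Int) :
    (PySem.Set.add S q).map pvEncode = PySem.Set.add (S.map pvEncode) (pvEncode q) := by
  by_cases hq : q ∈ S
  · rw [PySem.Set.add_of_mem hq, PySem.Set.add_of_mem (List.mem_map_of_mem hq)]
  · unfold PySem.Set.add
    rw [if_neg (by simp [hq]),
        if_neg (by
          simp only [PySem.Set.contains_iff, List.mem_map]
          rintro ⟨a, ha, heq⟩
          exact hq ((pvEncode_inj heq) ▸ ha)), List.map_append]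
    rfl

theorem pv_scanl_eq_cons_tail (f : Int × Int → Int × Int → Int × Int)
    (b : Int × Int) (l : List (Int × Int)) :
    List.scanl f b l = b :: (List.scanl f b l).tail := by
  cases l <;> simp [List.scanl]

-- loop invariant for A: the dict's keys are the encodings of the set of visited
-- positions, and the current position has been visited
theorem pv_fold_keys (cs : List Char) :
    ∀ (d : PySem.Dict String Int) (p : Int × Int) (S : PySem.Set (Int × Int)),
      d.keys = S.map pvEncode → p ∈ S →
      (cs.foldl pvStepA (d, p.1, p.2)).1.keys
        = ((List.scanl pvMove p (cs.map pvDelta)).tail.foldl PySem.Set.add S).map pvEncode := by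
  induction cs with
  | nil => intro d p S hk _; simpa using hk
  | cons c cs ih =>
    intro d p S hk hp
    rw [List.map_cons, List.scanl_cons, List.tail_cons,
        pv_scanl_eq_cons_tail, List.foldl_cons]
    by_cases h1 : c = '^'
    · have hstep : pvStepA (d, p.1, p.2) c
          = (d.insert (pvEncode (pvMove p (pvDelta c)))
              (d.getD (pvEncode (pvMove p (pvDelta c))) 0 + 1),
             (pvMove p (pvDelta c)).1, (pvMove p (pvDelta c)).2) := by
        simp [pvStepA, pvDelta, pvMove, pvEncode, h1]
      rw [List.foldl_cons, hstep]
      rw [ih _ _ (PySem.Set.add S (pvMove p (pvDelta c)))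
            (by rw [pv_keys_insert, hk, pv_map_add])
            (by rw [PySem.Set.mem_add]; right; rfl)]
    · by_cases h2 : c = 'v'
      · have hstep : pvStepA (d, p.1, p.2) c
            = (d.insert (pvEncode (pvMove p (pvDelta c)))
                (d.getD (pvEncode (pvMove p (pvDelta c))) 0 + 1),
               (pvMove p (pvDelta c)).1, (pvMove p (pvDelta c)).2) := by
          simp [pvStepA, pvDelta, pvMove, pvEncode, h2, sub_eq_add_neg]
        rw [List.foldl_cons, hstep]
        rw [ih _ _ (PySem.Set.add S (pvMove p (pvDelta c)))
              (by rw [pv_keys_insert, hk, pv_map_add])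
              (by rw [PySem.Set.mem_add]; right; rfl)]
      · by_cases h3 : c = '>'
        · have hstep : pvStepA (d, p.1, p.2) c
              = (d.insert (pvEncode (pvMove p (pvDelta c)))
                  (d.getD (pvEncode (pvMove p (pvDelta c))) 0 + 1),
                 (pvMove p (pvDelta c)).1, (pvMove p (pvDelta c)).2) := by
            simp [pvStepA, pvDelta, pvMove, pvEncode, h3]
          rw [List.foldl_cons, hstep]
          rw [ih _ _ (PySem.Set.add S (pvMove p (pvDelta c)))
                (by rw [pv_keys_insert, hk, pv_map_add])
                (by rw [PySem.Set.mem_add]; right; rfl)]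
        · by_cases h4 : c = '<'
          · have hstep : pvStepA (d, p.1, p.2) c
                = (d.insert (pvEncode (pvMove p (pvDelta c)))
                    (d.getD (pvEncode (pvMove p (pvDelta c))) 0 + 1),
                   (pvMove p (pvDelta c)).1, (pvMove p (pvDelta c)).2) := by
              simp [pvStepA, pvDelta, pvMove, pvEncode, h4, sub_eq_add_neg]
            rw [List.foldl_cons, hstep]
            rw [ih _ _ (PySem.Set.add S (pvMove p (pvDelta c)))
                  (by rw [pv_keys_insert, hk, pv_map_add])
                  (by rw [PySem.Set.mem_add]; right; rfl)]
          · have hm : pvMove p (pvDelta c) = p := by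
              simp [pvDelta, pvMove, h1, h2, h3, h4]
            have hstep : pvStepA (d, p.1, p.2) c = (d, p.1, p.2) := by
              simp [pvStepA, h1, h2, h3, h4]
            rw [List.foldl_cons, hstep, hm, PySem.Set.add_of_mem hp, ih _ _ S hk hp]

-- B's loop builds exactly the prefix positions
theorem pv_foldB (cs : List Char) :
    ∀ (p : Int × Int) (acc : List (Int × Int)),
      (cs.foldl pvStepB (p.1, p.2, acc)).2.2
        = acc ++ (List.scanl pvMove p (cs.map pvDelta)).tail := by
  induction cs with
  | nil => intro p acc; simp
  | cons c cs ih =>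
    intro p acc
    have hstep : pvStepB (p.1, p.2, acc) c
        = ((pvMove p (pvDelta c)).1, (pvMove p (pvDelta c)).2,
           acc ++ [pvMove p (pvDelta c)]) := by
      simp [pvStepB, pvMove]
    rw [List.foldl_cons, hstep, ih, List.map_cons, List.scanl_cons, List.tail_cons,
        pv_scanl_eq_cons_tail, List.append_assoc]
    rfl

-- ----- the sort-then-scan side -----

-- Python's lexicographic strict order on Int pairs (sorted2's comparison)
def pvLexLT (a b : Int × Int) : Bool :=
  decide (a.1 < b.1) || (!decide (b.1 < a.1) && decide (a.2 < b.2))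

theorem pv_sorted2_eq (l : List (Int × Int)) :
    PySem.List.sorted2 l Prod.fst Prod.snd
      = l.foldl (fun acc x => PySem.List.insertBy pvLexLT x acc) [] := rfl

theorem pvLexLT_iff (a b : Int × Int) :
    pvLexLT a b = true ↔ (a.1 < b.1 ∨ (¬ b.1 < a.1 ∧ a.2 < b.2)) := by
  simp [pvLexLT]

theorem pv_antisymm {a b : Int × Int}
    (h1 : pvLexLT a b = false) (h2 : pvLexLT b a = false) : a = b := by
  rw [← Bool.not_eq_true] at h1 h2
  rw [pvLexLT_iff] at h1 h2
  push Not at h1 h2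
  obtain ⟨a1, a2⟩ := a; obtain ⟨b1, b2⟩ := b
  simp_all
  omega

theorem pv_asymm {x y : Int × Int} (h : pvLexLT x y = true) : pvLexLT y x = false := by
  rw [← Bool.not_eq_true]
  rw [pvLexLT_iff] at h ⊢
  obtain ⟨a1, a2⟩ := x; obtain ⟨b1, b2⟩ := y
  simp_all only
  omega

theorem pv_lt_le {x y z : Int × Int} (h1 : pvLexLT x y = true)
    (h2 : pvLexLT z y = false) : pvLexLT z x = false := by
  rw [← Bool.not_eq_true] at h2 ⊢
  rw [pvLexLT_iff] at h1 h2 ⊢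
  obtain ⟨a1, a2⟩ := x; obtain ⟨b1, b2⟩ := y; obtain ⟨c1, c2⟩ := z
  simp_all only
  omega

-- the "sorted ≤" relation: a before b iff not (b < a)
theorem pv_insertBy_pairwise (x : Int × Int) (acc : List (Int × Int))
    (h : acc.Pairwise (fun a b => pvLexLT b a = false)) :
    (PySem.List.insertBy pvLexLT x acc).Pairwise (fun a b => pvLexLT b a = false) := by
  induction acc with
  | nil => simp [PySem.List.insertBy]
  | cons y ys ih =>
    rw [List.pairwise_cons] at h
    obtain ⟨hy, hys⟩ := h
    show (if pvLexLT x y then x :: y :: ys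
          else y :: PySem.List.insertBy pvLexLT x ys).Pairwise _
    by_cases hxy : pvLexLT x y = true
    · rw [if_pos hxy, List.pairwise_cons]
      refine ⟨?_, List.pairwise_cons.mpr ⟨hy, hys⟩⟩
      intro z hz
      rcases List.mem_cons.mp hz with rfl | hz
      · exact pv_asymm hxy
      · exact pv_lt_le hxy (hy z hz)
    · rw [Bool.not_eq_true] at hxy
      rw [if_neg (by simp [hxy]), List.pairwise_cons]
      refine ⟨?_, ih hys⟩
      intro z hz
      rcases (PySem.List.mem_insertBy _ _ _ _).mp hz with rfl | hz
      · exact hxy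
      · exact hy z hz

theorem pv_foldl_insert_pairwise (l : List (Int × Int)) :
    ∀ acc : List (Int × Int), acc.Pairwise (fun a b => pvLexLT b a = false) →
      (l.foldl (fun acc x => PySem.List.insertBy pvLexLT x acc) acc).Pairwise
        (fun a b => pvLexLT b a = false) := by
  induction l with
  | nil => intro acc h; simpa using h
  | cons x xs ih => intro acc h; exact ih _ (pv_insertBy_pairwise x acc h)

-- counting adjacent changes in a sorted list counts the distinct elements
theorem pv_card_count (t : List (Int × Int)) :
    ∀ a : Int × Int, (a :: t).Pairwise (fun u v => pvLexLT v u = false) →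
      (a :: t).toFinset.card
        = 1 + ((a :: t).zip t).countP (fun p => decide (p.1 ≠ p.2)) := by
  induction t with
  | nil => intro a _; simp
  | cons b t' ih =>
    intro a h
    rw [List.pairwise_cons] at h
    obtain ⟨ha, htail⟩ := h
    have hIH := ih b htail
    rw [List.zip_cons_cons, List.countP_cons]
    by_cases hab : a = b
    · subst hab
      simp only [ne_eq, not_true_eq_false, decide_false]
      have : (a :: a :: t').toFinset = (a :: t').toFinset := by
        simp [List.toFinset_cons]
      rw [this, hIH]
      simp
    · have hnotmem : a ∉ (b :: t').toFinset := by
        rw [List.mem_toFinset]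
        intro hmem
        rcases List.mem_cons.mp hmem with rfl | hmem
        · exact hab rfl
        · rw [List.pairwise_cons] at htail
          exact hab (pv_antisymm (htail.1 a hmem) (ha b List.mem_cons_self))
      have hcard : (a :: b :: t').toFinset.card = 1 + (b :: t').toFinset.card := by
        rw [List.toFinset_cons, Finset.card_insert_of_notMem hnotmem]
        omega
      rw [hcard, hIH]
      simp [hab]
      omega

theorem pv_len_ofList (l : List (Int × Int)) :
    (PySem.Set.ofList l).length = l.toFinset.card := by
  have hnd := PySem.Set.nodup_ofList l
  have hfe : (PySem.Set.ofList l).toFinset = l.toFinset := by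
    apply Finset.ext
    intro x
    simp [List.mem_toFinset, PySem.Set.mem_ofList]
  rw [← List.toFinset_card_of_nodup hnd, hfe]

-- main counting lemma: |set(l)| = 1 + adjacent changes of sorted(l), l ≠ []
theorem pv_count_sorted (l : List (Int × Int)) (hne : l ≠ []) :
    (PySem.Set.ofList l).length
      = 1 + (((PySem.List.sorted2 l Prod.fst Prod.snd).zip
              (PySem.List.sorted2 l Prod.fst Prod.snd).tail).countP
              (fun p => decide (p.1 ≠ p.2))) := by
  have hperm : (PySem.List.sorted2 l Prod.fst Prod.snd).Perm l :=
    PySem.List.sorted2_perm l Prod.fst Prod.snd false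
  have hpw : (PySem.List.sorted2 l Prod.fst Prod.snd).Pairwise
      (fun a b => pvLexLT b a = false) := by
    rw [pv_sorted2_eq]
    exact pv_foldl_insert_pairwise l [] (by simp)
  have hsne : PySem.List.sorted2 l Prod.fst Prod.snd ≠ [] := by
    intro hnil
    apply hne
    have h' := hperm
    rw [hnil] at h'
    exact h'.symm.eq_nil
  have hfe : (PySem.List.sorted2 l Prod.fst Prod.snd).toFinset = l.toFinset := by
    apply Finset.ext
    intro x
    simp [List.mem_toFinset, hperm.mem_iff]
  obtain ⟨a, t, hat⟩ := List.exists_cons_of_ne_nil hsne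
  rw [pv_len_ofList, ← hfe, hat]
  rw [hat] at hpw
  simpa using pv_card_count t a hpw

-- ===== VERDICT (by name: the statement is the Claim_ definition above) =====
theorem solo_santa_spec : Claim_equal_solo_santa := by
  intro directions _
  unfold Spec_solo_santa solo_santa solo_santa_alt
  dsimp only
  -- the full list of visited positions
  set P := List.scanl pvMove ((0 : Int), (0 : Int)) (directions.toList.map pvDelta) with hP
  -- B's loop builds P
  have hp0 : ((0 : Int), (0 : Int)) = (((0 : Int), (0 : Int)).1, ((0 : Int), (0 : Int)).2) := rfl
  have hB : (directions.toList.foldl pvStepB (0, 0, [((0 : Int), (0 : Int))])).2.2 = P := by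
    have := pv_foldB directions.toList ((0 : Int), (0 : Int)) [((0 : Int), (0 : Int))]
    rw [hP, pv_scanl_eq_cons_tail]
    exact this
  -- A's dict keys encode set(P)
  have h0 : ("0, 0" : String) = pvEncode ((0 : Int), (0 : Int)) := by decide
  have hd0 : ((PySem.Dict.empty : PySem.Dict String Int).insert "0, 0"
      ((PySem.Dict.empty : PySem.Dict String Int).getD "0, 0" 0 + 1)).keys
      = ([((0 : Int), (0 : Int))] : List (Int × Int)).map pvEncode := by
    rw [pv_keys_insert, h0]
    rfl
  have hmain := pv_fold_keys directions.toList _ ((0 : Int), (0 : Int))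
      [((0 : Int), (0 : Int))] hd0 (List.mem_singleton.mpr rfl)
  have hofl : PySem.Set.ofList P = P.tail.foldl PySem.Set.add [((0 : Int), (0 : Int))] := by
    rw [PySem.Set.ofList_eq_foldl, hP, pv_scanl_eq_cons_tail, List.foldl_cons]
    rfl
  have hlen : (List.foldl pvStepA
      ((PySem.Dict.empty : PySem.Dict String Int).insert "0, 0"
        ((PySem.Dict.empty : PySem.Dict String Int).getD "0, 0" 0 + 1), 0, 0)
      directions.toList).1.items.length
      = (PySem.Set.ofList P).length := by
    have hkl : ∀ (d : PySem.Dict String Int), d.items.length = d.keys.length := by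
      intro d; unfold PySem.Dict.keys; simp
    rw [hkl, hmain, hofl, List.length_map]
  have hPne : P ≠ [] := by
    rw [hP, pv_scanl_eq_cons_tail]
    exact List.cons_ne_nil _ _
  rw [hlen, hB, pv_count_sorted P hPne]
  push_cast
  ring
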